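-- pv_equiv track=rewrite | github.com/fjemi/mono_repo | functions/coding_challenges/longest_word_in_dictionary/app.py | subsequence_check
-- ===== SOURCE A (Python) =====
-- from typing import List, Dict
--
-- def subsequence_check(
--   string_sequences: List[List[str]],
--   word_sequences: List[List[str]],
-- ) -> bool:
--   n = len(string_sequences)
--   m = len(word_sequences)
--
--   # Handle case of word having more char sequences than string
--   if m > n:
--     return False
--
--   # Handle all other cases
--   store = []
--   n = len(word_sequences)
--   m = len(string_sequences)
--   # Index to start iterating through string sequences
--   start_index = 0
--
--   # Iterate thorugh sequences of the word sequences
--   for i in range(n):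
--     word_sequence = word_sequences[i]
--     word_char = word_sequence[0]
--     word_char_n = len(word_char)
--     # Iterate through sequences of the string
--     # sequences to find matches
--     for j in range(start_index, m):
--       string_sequence = string_sequences[j]
--       string_sequence_n = len(string_sequence)
--       # Conditions for a word char to match a string
--       # sequence's char and order
--       conditions = [
--         word_char in string_sequence,
--         word_char_n <= string_sequence_n,
--       ]
--       # Word char doesn't match the chars in the string sequence
--       if sum(conditions) != len(conditions):
--         continue
--       # When word char matches chars in the string sequence
--       # store the word char and set the start index for the
--       # string sequences to the current index
--       store.append(word_char)
--       start_index = j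
--       break
--
--   if len(store) == n:
--     return True
--   return False
-- ===== SOURCE B (Python) =====
-- def subsequence_check(string_sequences, word_sequences):
--   # One forward pass over string_sequences with a single pointer into the word chars.
--   if len(word_sequences) > len(string_sequences):
--     return False
--   chars = [w[0] for w in word_sequences]
--   i = 0
--   for seq in string_sequences:
--     # A string sequence may satisfy several consecutive word chars
--     # (A restarts its scan at the matched index, not after it).
--     while i < len(chars) and chars[i] in seq and len(chars[i]) <= len(seq):
--       i += 1
--   return i == len(chars)
-- ===== Notes on version B (the rewrite author's own statement) =====
-- stated objective: alternative
-- what changed: Replaces A's per-word-char rescan of the string sequences (nested loops with a start_index) by the classic single forward pass: one pointer into the word chars is advanced while the current string sequence matches, so each string sequence is visited once (intended as faster; measured ~1.7x at the largest size but not consistently above 1.5x).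
import Mathlib
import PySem

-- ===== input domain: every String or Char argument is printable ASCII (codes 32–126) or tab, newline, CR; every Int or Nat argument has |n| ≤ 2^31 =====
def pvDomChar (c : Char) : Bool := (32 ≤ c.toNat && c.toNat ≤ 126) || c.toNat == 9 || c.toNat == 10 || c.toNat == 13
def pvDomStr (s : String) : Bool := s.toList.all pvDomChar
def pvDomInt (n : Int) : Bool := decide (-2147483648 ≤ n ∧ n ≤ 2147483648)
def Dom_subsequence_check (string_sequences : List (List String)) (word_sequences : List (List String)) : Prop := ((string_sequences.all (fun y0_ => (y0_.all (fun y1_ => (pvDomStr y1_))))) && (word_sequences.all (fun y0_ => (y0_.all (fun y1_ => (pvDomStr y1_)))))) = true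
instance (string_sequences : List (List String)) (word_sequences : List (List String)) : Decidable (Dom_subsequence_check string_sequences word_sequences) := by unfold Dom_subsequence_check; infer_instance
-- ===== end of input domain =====

-- B replaces A's per-word-char rescans (start_index) by one forward pass with a pointer into the word chars.

-- ===== PORT A =====
-- inner 'for j in range(start_index, m): … continue/break' loop; Option Int = index where it broke
def innerA (ss : List (List String)) (wc : String) : List Int → Option Int
  | [] => none
  | j :: rest =>
    let seq := (PySem.List.pyGet? ss j).getD []
    let c1 : Nat := if seq.contains wc then 1 else 0
    let c2 : Nat := if PySem.Str.len wc ≤ (seq.length : Int) then 1 else 0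
    if c1 + c2 ≠ 2 then innerA ss wc rest
    else some j

-- outer 'for i in range(n)' loop carrying (store, start_index); ws[i][0] raises on an empty
-- word sequence in Python — excluded by Pre_ (here .getD is unreachable under Pre_)
def outerA (ss ws : List (List String)) : List Int → List String × Int → List String × Int
  | [], st => st
  | i :: rest, (store, start_index) =>
    let word_sequence := (PySem.List.pyGet? ws i).getD []
    let word_char := (PySem.List.pyGet? word_sequence 0).getD ""
    match innerA ss word_char (PySem.List.pyRange start_index (ss.length : Int) 1) with
    | none => outerA ss ws rest (store, start_index)
    | some j => outerA ss ws rest (store ++ [word_char], j)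

def subsequence_check (string_sequences : List (List String)) (word_sequences : List (List String)) : Bool :=
  let n := string_sequences.length
  let m := word_sequences.length
  if (m : Int) > (n : Int) then false
  else
    let st := outerA string_sequences word_sequences
      (PySem.List.pyRange 0 (word_sequences.length : Int) 1) ([], 0)
    decide (st.1.length = word_sequences.length)

-- ===== PORT B =====
-- the 'while i < len(chars) and chars[i] in seq and len(chars[i]) <= len(seq): i += 1' loop
def consumeB (chars seq : List String) (i : Nat) : Nat :=
  if h : i < chars.length then
    if seq.contains chars[i] && decide (PySem.Str.len chars[i] ≤ (seq.length : Int)) then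
      consumeB chars seq (i + 1)
    else i
  else i
termination_by chars.length - i

def subsequence_check_alt (string_sequences : List (List String)) (word_sequences : List (List String)) : Bool :=
  if word_sequences.length > string_sequences.length then false
  else
    -- chars = [w[0] for w in word_sequences]; w[0] raises on an empty w — excluded by Pre_
    let chars := word_sequences.map (fun w => (PySem.List.pyGet? w 0).getD "")
    let i := string_sequences.foldl (fun i seq => consumeB chars seq i) 0
    decide (i = chars.length)

-- ===== PRECONDITION & SPEC =====
-- Pre_ excludes exactly the inputs where Python A raises IndexError (an empty word sequence,
-- reached only when len(word_sequences) <= len(string_sequences)); Python B raises there too.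
def Pre_subsequence_check (string_sequences : List (List String)) (word_sequences : List (List String)) : Prop :=
  word_sequences.length ≤ string_sequences.length → ∀ w ∈ word_sequences, w ≠ []
instance (string_sequences : List (List String)) (word_sequences : List (List String)) : Decidable (Pre_subsequence_check string_sequences word_sequences) := by unfold Pre_subsequence_check; infer_instance

def pvWitness_subsequence_check : List (List String) × List (List String) := ([["a"], ["b", "c"]], [["a"], ["c"]])

def Spec_subsequence_check (string_sequences : List (List String)) (word_sequences : List (List String)) (out : Bool) : Prop := out = subsequence_check_alt string_sequences word_sequences
instance (string_sequences : List (List String)) (word_sequences : List (List String)) (out : Bool) : Decidable (Spec_subsequence_check string_sequences word_sequences out) := by unfold Spec_subsequence_check; infer_instance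

-- ===== CLAIM (what is proved, stated in full; the proofs are below) =====
def Claim_equal_subsequence_check : Prop := ∀ (string_sequences : List (List String)) (word_sequences : List (List String)), Dom_subsequence_check string_sequences word_sequences → Pre_subsequence_check string_sequences word_sequences → Spec_subsequence_check string_sequences word_sequences (subsequence_check string_sequences word_sequences)

-- ===== LEMMAS AND PROOFS =====

-- the matching condition both programs test on a word char and a string sequence
def mtch (c : String) (s : List String) : Bool :=
  s.contains c && decide (PySem.Str.len c ≤ (s.length : Int))

-- reference greedy matcher (a matched sequence may be reused by the next char, as in A)
def ref2 : List String → List (List String) → Bool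
  | [], _ => true
  | _ :: _, [] => false
  | c :: cs, s :: rest => if mtch c s then ref2 cs (s :: rest) else ref2 (c :: cs) rest
termination_by cs seqs => cs.length + seqs.length

-- index of the first matching sequence
def firstIdx (c : String) : List (List String) → Option Nat
  | [] => none
  | s :: rest => if mtch c s then some 0 else (firstIdx c rest).map (· + 1)

-- ---- B-side: the foldl of consumeB succeeds exactly when ref2 does ----

lemma consumeB_le_aux (chars s : List String) :
    ∀ (k i : Nat), chars.length - i ≤ k → i ≤ chars.length → consumeB chars s i ≤ chars.length := by
  intro k
  induction k with
  | zero =>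
    intro i h1 h2
    rw [consumeB, dif_neg (by omega)]
    exact h2
  | succ k ih =>
    intro i h1 h2
    rw [consumeB]
    by_cases h : i < chars.length
    · rw [dif_pos h]
      split
      · exact ih (i + 1) (by omega) (by omega)
      · exact h2
    · rw [dif_neg h]; exact h2

lemma consumeB_le (chars s : List String) (i : Nat) (h : i ≤ chars.length) :
    consumeB chars s i ≤ chars.length :=
  consumeB_le_aux chars s (chars.length - i) i le_rfl h

lemma ref2_consume_aux (chars s : List String) (rest : List (List String)) :
    ∀ (k i : Nat), chars.length - i ≤ k → i ≤ chars.length →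
      ref2 (chars.drop i) (s :: rest) = ref2 (chars.drop (consumeB chars s i)) rest := by
  intro k
  induction k with
  | zero =>
    intro i h1 h2
    rw [consumeB, dif_neg (by omega), List.drop_of_length_le (by omega)]
    simp [ref2]
  | succ k ih =>
    intro i h1 h2
    rw [consumeB]
    by_cases h : i < chars.length
    · rw [dif_pos h]
      have hd : chars.drop i = chars[i] :: chars.drop (i + 1) := (List.getElem_cons_drop h).symm
      by_cases hm : mtch chars[i] s
      · have hm' : (s.contains chars[i] && decide (PySem.Str.len chars[i] ≤ (s.length : Int))) = true := hm
        rw [if_pos hm', hd, ref2, if_pos hm]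
        exact ih (i + 1) (by omega) (by omega)
      · have hm' : ¬ (s.contains chars[i] && decide (PySem.Str.len chars[i] ≤ (s.length : Int))) = true := hm
        rw [if_neg hm', hd, ref2, if_neg hm, ← hd]
    · rw [dif_neg h, List.drop_of_length_le (by omega)]
      simp [ref2]

lemma ref2_consume (chars s : List String) (rest : List (List String)) (i : Nat)
    (h : i ≤ chars.length) :
    ref2 (chars.drop i) (s :: rest) = ref2 (chars.drop (consumeB chars s i)) rest :=
  ref2_consume_aux chars s rest (chars.length - i) i le_rfl h

lemma foldl_B (chars : List String) :
    ∀ (seqs : List (List String)) (i : Nat), i ≤ chars.length →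
      ((seqs.foldl (fun i seq => consumeB chars seq i) i = chars.length)
        ↔ ref2 (chars.drop i) seqs = true) := by
  intro seqs
  induction seqs with
  | nil =>
    intro i h
    simp only [List.foldl_nil]
    by_cases hi : i = chars.length
    · subst hi
      rw [List.drop_of_length_le le_rfl]
      simp [ref2]
    · have hlt : i < chars.length := by omega
      rw [(List.getElem_cons_drop hlt).symm, ref2]
      simp [hi]
  | cons s rest ih =>
    intro i h
    simp only [List.foldl_cons]
    rw [ih (consumeB chars s i) (consumeB_le chars s i h), ← ref2_consume chars s rest i h]

-- ---- A-side: innerA finds the first match; outerA's store counts the matches ----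

lemma cond_ne_two (wc : String) (seq : List String) :
    (((if seq.contains wc then (1 : Nat) else 0)
      + (if PySem.Str.len wc ≤ (seq.length : Int) then (1 : Nat) else 0)) ≠ 2)
      ↔ mtch wc seq = false := by
  by_cases h1 : wc ∈ seq <;> by_cases h2 : wc.length ≤ seq.length <;>
    simp [mtch, h1, h2]

lemma inner_eq_aux (ss : List (List String)) (wc : String) :
    ∀ (k start : Nat), ss.length - start ≤ k →
      innerA ss wc (PySem.List.pyRange (start : Int) (ss.length : Int) 1)
        = (firstIdx wc (ss.drop start)).map (fun j => ((start + j : Nat) : Int)) := by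
  intro k
  induction k with
  | zero =>
    intro start h
    have hge : ss.length ≤ start := by omega
    rw [PySem.List.pyRange_one_eq_nil (by exact_mod_cast hge), List.drop_of_length_le hge]
    simp [innerA, firstIdx]
  | succ k ih =>
    intro start h
    by_cases hs : start < ss.length
    · rw [PySem.List.pyRange_one_cons (by exact_mod_cast hs)]
      have hget : (PySem.List.pyGet? ss (start : Int)).getD [] = ss[start] := by
        rw [PySem.List.pyGet?_natCast, List.getElem?_eq_getElem hs, Option.getD_some]
      have hd : ss.drop start = ss[start] :: ss.drop (start + 1) :=
        (List.getElem_cons_drop hs).symm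
      have hcast : ((start : Int) + 1) = ((start + 1 : Nat) : Int) := by push_cast; ring
      by_cases hm : mtch wc ss[start]
      · have hc : ¬ (((if ((PySem.List.pyGet? ss (start : Int)).getD []).contains wc then (1 : Nat) else 0)
            + (if PySem.Str.len wc ≤ ((((PySem.List.pyGet? ss (start : Int)).getD []).length : Nat) : Int) then (1 : Nat) else 0)) ≠ 2) := by
          rw [hget, cond_ne_two]
          simp [hm]
        rw [innerA, if_neg hc, hd, firstIdx, if_pos hm]
        simp
      · have hc : (((if ((PySem.List.pyGet? ss (start : Int)).getD []).contains wc then (1 : Nat) else 0)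
            + (if PySem.Str.len wc ≤ ((((PySem.List.pyGet? ss (start : Int)).getD []).length : Nat) : Int) then (1 : Nat) else 0)) ≠ 2) := by
          rw [hget, cond_ne_two]
          simp [hm]
        rw [innerA, if_pos hc, hcast, ih (start + 1) (by omega), hd, firstIdx, if_neg hm]
        cases hfi : firstIdx wc (ss.drop (start + 1)) with
        | none => simp
        | some j =>
          simp only [Option.map_some]
          congr 1
          push_cast
          ring
    · have hge : ss.length ≤ start := by omega
      rw [PySem.List.pyRange_one_eq_nil (by exact_mod_cast hge), List.drop_of_length_le hge]
      simp [innerA, firstIdx]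

lemma inner_eq (ss : List (List String)) (wc : String) (start : Nat) :
    innerA ss wc (PySem.List.pyRange (start : Int) (ss.length : Int) 1)
      = (firstIdx wc (ss.drop start)).map (fun j => ((start + j : Nat) : Int)) :=
  inner_eq_aux ss wc (ss.length - start) start le_rfl

lemma firstIdx_lt (c : String) :
    ∀ (seqs : List (List String)) (k : Nat), firstIdx c seqs = some k → k < seqs.length := by
  intro seqs
  induction seqs with
  | nil => intro k h; simp [firstIdx] at h
  | cons s rest ih =>
    intro k h
    rw [firstIdx] at h
    by_cases hm : mtch c s
    · rw [if_pos hm] at h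
      simp at h
      simp only [List.length_cons]
      omega
    · rw [if_neg hm] at h
      cases hfi : firstIdx c rest with
      | none => rw [hfi] at h; simp at h
      | some j =>
        rw [hfi] at h
        simp at h
        have := ih j hfi
        simp only [List.length_cons]
        omega

lemma ref2_firstIdx_none (c : String) (cs : List String) :
    ∀ (seqs : List (List String)), firstIdx c seqs = none → ref2 (c :: cs) seqs = false := by
  intro seqs
  induction seqs with
  | nil => intro _; rw [ref2]
  | cons s rest ih =>
    intro h
    rw [firstIdx] at h
    by_cases hm : mtch c s
    · rw [if_pos hm] at h; simp at h
    · rw [if_neg hm] at h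
      rw [ref2, if_neg hm]
      refine ih ?_
      cases hfi : firstIdx c rest with
      | none => rfl
      | some j => rw [hfi] at h; simp at h

lemma ref2_firstIdx_some (c : String) (cs : List String) :
    ∀ (seqs : List (List String)) (k : Nat), firstIdx c seqs = some k →
      ref2 (c :: cs) seqs = ref2 cs (seqs.drop k) := by
  intro seqs
  induction seqs with
  | nil => intro k h; simp [firstIdx] at h
  | cons s rest ih =>
    intro k h
    rw [firstIdx] at h
    by_cases hm : mtch c s
    · rw [if_pos hm] at h
      simp at h
      subst h
      rw [ref2, if_pos hm]
      rfl
    · rw [if_neg hm] at h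
      cases hfi : firstIdx c rest with
      | none => rw [hfi] at h; simp at h
      | some j =>
        rw [hfi] at h
        simp at h
        subst h
        rw [ref2, if_neg hm, ih j hfi]
        rfl

lemma outer_le (ss ws : List (List String)) :
    ∀ (is : List Int) (store : List String) (start : Int),
      (outerA ss ws is (store, start)).1.length ≤ store.length + is.length := by
  intro is
  induction is with
  | nil => intro store start; simp [outerA]
  | cons i rest ih =>
    intro store start
    rw [outerA]
    cases h : innerA ss ((PySem.List.pyGet? ((PySem.List.pyGet? ws i).getD []) 0).getD "")
        (PySem.List.pyRange start (ss.length : Int) 1) with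
    | none =>
      have := ih store start
      simp only [List.length_cons]
      omega
    | some j =>
      have := ih (store ++ [(PySem.List.pyGet? ((PySem.List.pyGet? ws i).getD []) 0).getD ""]) j
      simp only [List.length_cons, List.length_append, List.length_nil] at this ⊢
      omega

lemma outer_iff (ss ws : List (List String)) :
    ∀ (k i0 : Nat) (store : List String) (start : Nat),
      ws.length - i0 ≤ k → start ≤ ss.length →
      ((outerA ss ws (PySem.List.pyRange (i0 : Int) (ws.length : Int) 1)
          (store, (start : Int))).1.length = store.length + (ws.length - i0)
        ↔ ref2 ((ws.map (fun w => (PySem.List.pyGet? w 0).getD "")).drop i0)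
            (ss.drop start) = true) := by
  intro k
  induction k with
  | zero =>
    intro i0 store start h hstart
    have hge : ws.length ≤ i0 := by omega
    have hz : ws.length - i0 = 0 := by omega
    rw [PySem.List.pyRange_one_eq_nil (by exact_mod_cast hge), outerA,
      List.drop_of_length_le (by simpa using hge), hz]
    simp [ref2]
  | succ k ih =>
    intro i0 store start h hstart
    by_cases hi : i0 < ws.length
    · rw [PySem.List.pyRange_one_cons (by exact_mod_cast hi), outerA]
      have hws : (PySem.List.pyGet? ws (i0 : Int)).getD [] = ws[i0] := by
        rw [PySem.List.pyGet?_natCast, List.getElem?_eq_getElem hi, Option.getD_some]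
      rw [hws]
      have hdrop : ws.drop i0 = ws[i0] :: ws.drop (i0 + 1) := (List.getElem_cons_drop hi).symm
      have hdc : (ws.map (fun w => (PySem.List.pyGet? w 0).getD "")).drop i0
          = ((PySem.List.pyGet? ws[i0] 0).getD "")
            :: (ws.map (fun w => (PySem.List.pyGet? w 0).getD "")).drop (i0 + 1) := by
        rw [← List.map_drop, hdrop, List.map_cons, List.map_drop]
      have hcast : ((i0 : Int) + 1) = ((i0 + 1 : Nat) : Int) := by push_cast; ring
      rw [inner_eq ss _ start]
      cases hfi : firstIdx ((PySem.List.pyGet? ws[i0] 0).getD "") (ss.drop start) with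
      | none =>
        simp only [Option.map_none]
        have hle := outer_le ss ws (PySem.List.pyRange ((i0 : Int) + 1) (ws.length : Int) 1)
          store (start : Int)
        have hrl : (PySem.List.pyRange ((i0 : Int) + 1) (ws.length : Int) 1).length
            = ws.length - (i0 + 1) := by
          rw [PySem.List.length_pyRange_one]
          omega
        rw [hdc, ref2_firstIdx_none _ _ _ hfi]
        simp only [Bool.false_eq_true, iff_false]
        intro hlen
        rw [hrl] at hle
        omega
      | some kk =>
        simp only [Option.map_some]
        have hkk := firstIdx_lt _ _ _ hfi
        have hkk' : start + kk ≤ ss.length := by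
          rw [List.length_drop] at hkk
          omega
        have harith : store.length + (ws.length - i0)
            = (store ++ [(PySem.List.pyGet? ws[i0] 0).getD ""]).length + (ws.length - (i0 + 1)) := by
          simp
          omega
        rw [harith, hcast, ih (i0 + 1) (store ++ [(PySem.List.pyGet? ws[i0] 0).getD ""]) (start + kk)
          (by omega) hkk']
        rw [hdc, ref2_firstIdx_some _ _ _ _ hfi, List.drop_drop]
    · have hge : ws.length ≤ i0 := by omega
      have hz : ws.length - i0 = 0 := by omega
      rw [PySem.List.pyRange_one_eq_nil (by exact_mod_cast hge), outerA,
        List.drop_of_length_le (by simpa using hge), hz]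
      simp [ref2]

-- ===== VERDICT (by name: the statement is the Claim_ definition above) =====
theorem subsequence_check_spec : Claim_equal_subsequence_check := by
  unfold Claim_equal_subsequence_check
  intro ss ws _ _
  unfold Spec_subsequence_check subsequence_check subsequence_check_alt
  by_cases hmn : ws.length > ss.length
  · rw [if_pos (by exact_mod_cast hmn), if_pos hmn]
  · rw [if_neg (by exact_mod_cast hmn), if_neg hmn]
    have hA := outer_iff ss ws ws.length 0 [] 0 (by omega) (by omega)
    have hB := foldl_B (ws.map (fun w => (PySem.List.pyGet? w 0).getD "")) ss 0 (by omega)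
    simp only [Nat.cast_zero, List.length_nil, Nat.sub_zero, Nat.zero_add, List.drop_zero] at hA hB
    simp only [decide_eq_decide]
    rw [hB]
    constructor
    · intro hlen
      exact hA.mp (by omega)
    · intro hr
      have := hA.mpr hr
      omega
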